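-- pv_equiv track=rewrite | github.com/SoonTaeYouL/CodingTestPractice | 프로그래머스/unrated/181890. 왼쪽 오른쪽/왼쪽 오른쪽.py | solution
-- ===== SOURCE A (Python) =====
-- def solution(str_list):
--     for i in range(len(str_list)):
--         if str_list[i]=="l":
--             return str_list[0:i]
--             break
--         if str_list[i]=="r":
--             return str_list[i+1:]
--             break
--     if "l" or "r" not in str_list:
--         return []
-- ===== SOURCE B (Python) =====
-- def solution(str_list):
--     # One backward pass with a tag accumulator: scan from the end, remembering
--     # which marker is currently first ('l'/'r'/none) and building the 'l'-prefix
--     # back-to-front; no forward search and no early returns.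
--     tag = None
--     buf = []
--     ri = -1
--     for i in range(len(str_list) - 1, -1, -1):
--         h = str_list[i]
--         if h == "l":
--             tag = "l"
--             buf = []
--         elif h == "r":
--             tag = "r"
--             ri = i
--         elif tag == "l":
--             buf.append(h)
--     if tag == "l":
--         return buf[::-1]
--     if tag == "r":
--         return str_list[ri + 1:]
--     return []
-- ===== Notes on version B (the rewrite author's own statement) =====
-- stated objective: alternative
-- what changed: Replaced the forward scan with two early returns by a single backward pass that maintains a tag for whichever marker is currently first, rebuilding the 'l'-prefix back-to-front and recording the first 'r' index, with one selection at the end.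
import Mathlib
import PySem

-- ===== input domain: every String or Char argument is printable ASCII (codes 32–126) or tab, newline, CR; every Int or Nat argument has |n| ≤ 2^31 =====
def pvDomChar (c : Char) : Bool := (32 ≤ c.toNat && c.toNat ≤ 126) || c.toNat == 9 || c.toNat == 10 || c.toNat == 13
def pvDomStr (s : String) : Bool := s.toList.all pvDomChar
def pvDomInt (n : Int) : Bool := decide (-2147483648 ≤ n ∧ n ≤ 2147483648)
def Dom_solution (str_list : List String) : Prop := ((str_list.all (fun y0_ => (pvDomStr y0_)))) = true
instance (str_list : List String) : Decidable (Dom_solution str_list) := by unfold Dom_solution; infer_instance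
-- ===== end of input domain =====

-- B replaces A's forward scan with early returns by one backward pass keeping a
-- tag for the currently-first marker (alternative decomposition, same cost).

-- ===== PORT A =====
-- the 'for i in range(len(str_list))' loop with its early returns, as recursion on i;
-- the trailing 'if "l" or "r" not in str_list' is always truthy in Python, so the
-- fall-through returns [].
def solLoop (str_list : List String) (i : Nat) : List String :=
  if h : i < str_list.length then
    if str_list[i] = "l" then PySem.List.slice str_list (some 0) (some (i : Int))
    else if str_list[i] = "r" then PySem.List.slice str_list (some ((i : Int) + 1)) none
    else solLoop str_list (i + 1)
  else []
termination_by str_list.length - i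

def solution (str_list : List String) : List String :=
  solLoop str_list 0

-- ===== PORT B =====
-- loop body of Source B; state = (tag, buf, ri); 'h = str_list[i]' via pyGet? (always in
-- range for range indices, so the getD "" default is never consulted)
def altStep (str_list : List String) (st : Option String × List String × Int) (i : Int) :
    Option String × List String × Int :=
  let h := (PySem.List.pyGet? str_list i).getD ""
  let (tag, buf, ri) := st
  if h = "l" then (some "l", [], ri)
  else if h = "r" then (some "r", buf, i)
  else if tag = some "l" then (tag, buf ++ [h], ri)
  else (tag, buf, ri)

-- 'for i in range(len(str_list)-1, -1, -1)' as a foldl over pyRange; buf[::-1] is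
-- buf.reverse (exact: PySem.List.slice?_none_none_neg_one)
def solution_alt (str_list : List String) : List String :=
  let st := (PySem.List.pyRange ((str_list.length : Int) - 1) (-1) (-1)).foldl
      (altStep str_list) (none, [], -1)
  let (tag, buf, ri) := st
  if tag = some "l" then buf.reverse
  else if tag = some "r" then PySem.List.slice str_list (some (ri + 1)) none
  else []

-- ===== PRECONDITION & SPEC =====
def Spec_solution (str_list : List String) (out : List String) : Prop := out = solution_alt str_list
instance (str_list : List String) (out : List String) : Decidable (Spec_solution str_list out) := by unfold Spec_solution; infer_instance

-- ===== CLAIM (what is proved, stated in full; the proofs are below) =====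
def Claim_equal_solution : Prop := ∀ (str_list : List String), Dom_solution str_list → Spec_solution str_list (solution str_list)

-- ===== LEMMAS AND PROOFS =====

-- partial fold state: indices n-1 … i already processed
def pvT (xs : List String) (i : Nat) : Option String × List String × Int :=
  (PySem.List.pyRange ((xs.length : Int) - 1) ((i : Int) - 1) (-1)).foldl
    (altStep xs) (none, [], -1)

theorem pvT_len (xs : List String) : pvT xs xs.length = (none, [], -1) := by
  unfold pvT
  rw [PySem.List.pyRange_neg_one_eq_nil (by omega)]
  rfl

theorem pvT_step (xs : List String) (i : Nat) (h : i < xs.length) :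
    pvT xs i = altStep xs (pvT xs (i + 1)) i := by
  unfold pvT
  rw [PySem.List.pyRange_neg_one_eq_reverse, PySem.List.pyRange_neg_one_eq_reverse]
  have h1 : ((i : Int) - 1) + 1 = (i : Int) := by ring
  have h2 : (((i : Nat) + 1 : Nat) : Int) - 1 = (i : Int) := by push_cast; ring
  rw [h1, h2]
  rw [PySem.List.pyRange_one_cons (by omega)]
  simp [List.foldl_reverse]

-- the invariant tying the backward-fold state to A's forward loop
theorem pvT_inv (xs : List String) (i : Nat) (hle : i ≤ xs.length) :
    (pvT xs i).1 = none ∧ solLoop xs i = [] ∨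
    (pvT xs i).1 = some "l" ∧ solLoop xs i = xs.take i ++ (pvT xs i).2.1.reverse ∨
    (pvT xs i).1 = some "r" ∧ 0 ≤ (pvT xs i).2.2 ∧
      solLoop xs i = PySem.List.slice xs (some ((pvT xs i).2.2 + 1)) none := by
  by_cases h : i < xs.length
  · have IH := pvT_inv xs (i + 1) (by omega)
    have hget : (xs[i]?).getD "" = xs[i] := by
      simp [List.getElem?_eq_getElem h]
    rw [pvT_step xs i h, solLoop]
    rcases hst : pvT xs (i + 1) with ⟨tag, buf, ri⟩
    rw [hst] at IH
    by_cases hl : xs[i] = "l"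
    · refine Or.inr (Or.inl ?_)
      simp [altStep, hget, hl, h, PySem.List.slice_to_natCast]
    · by_cases hr : xs[i] = "r"
      · refine Or.inr (Or.inr ?_)
        refine ⟨by simp [altStep, hget, hl, hr, h], by simp [altStep, hget, hl, hr, h], ?_⟩
        simp [altStep, hget, hl, hr, h]
      · rcases IH with ⟨ht, hv⟩ | ⟨ht, hv⟩ | ⟨ht, hri, hv⟩
        · refine Or.inl ?_
          simp only [] at ht; subst ht
          simp [altStep, hget, hl, hr, h, hv]
        · refine Or.inr (Or.inl ?_)
          simp only [] at ht; subst ht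
          have htake : xs.take (i + 1) = xs.take i ++ [xs[i]] := by
            rw [List.take_add_one]
            simp [List.getElem?_eq_getElem h]
          simp [altStep, hget, hl, hr, h, hv]
          rw [htake, List.append_assoc, List.singleton_append]
        · refine Or.inr (Or.inr ?_)
          simp only [] at ht; subst ht
          simp only [] at hri hv
          simp [altStep, hget, hl, hr, h, hv, hri]
  · have hi : i = xs.length := by omega
    subst hi
    rw [pvT_len]
    rw [solLoop]
    simp
termination_by xs.length - i

-- ===== VERDICT (by name: the statement is the Claim_ definition above) =====
theorem solution_spec : Claim_equal_solution := by
  intro xs _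
  unfold Spec_solution solution solution_alt
  have hT : (PySem.List.pyRange ((xs.length : Int) - 1) (-1) (-1)).foldl
      (altStep xs) (none, [], -1) = pvT xs 0 := by
    unfold pvT; norm_num
  rw [hT]
  have h := pvT_inv xs 0 (by omega)
  rcases hst : pvT xs 0 with ⟨tag, buf, ri⟩
  rw [hst] at h
  rcases h with ⟨ht, hv⟩ | ⟨ht, hv⟩ | ⟨ht, hri, hv⟩ <;> simp_all
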